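-- pv_equiv track=rewrite | github.com/PartlyAtomic/cross-set-solver | cross_set/solver.py | list_solved
-- ===== SOURCE A (Python) =====
-- def list_solved(cell_list):
--     # All cells have one value
--     num_solved = sum(1 for cell in cell_list if len(cell) == 1)
--     if num_solved < len(cell_list):
--         return False
--
--     # There are no duplicate cells
--     cell_set = set(list(cell)[0] for cell in cell_list)
--     if len(cell_set) < len(cell_list):
--         return False
--
--     return True
-- ===== SOURCE B (Python) =====
-- def list_solved(cell_list):
--     seen = set()
--     for cell in cell_list:
--         if len(cell) != 1:
--             return False
--         v = list(cell)[0]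
--         if v in seen:
--             return False
--         seen.add(v)
--     return True
-- ===== Notes on version B (the rewrite author's own statement) =====
-- stated objective: simpler
-- what changed: Replaces A's two full passes (count singletons, then build the whole head-set and compare lengths) with one short-circuiting traversal that maintains an incremental seen-set and returns False at the first non-singleton cell or duplicate value.
import Mathlib
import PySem

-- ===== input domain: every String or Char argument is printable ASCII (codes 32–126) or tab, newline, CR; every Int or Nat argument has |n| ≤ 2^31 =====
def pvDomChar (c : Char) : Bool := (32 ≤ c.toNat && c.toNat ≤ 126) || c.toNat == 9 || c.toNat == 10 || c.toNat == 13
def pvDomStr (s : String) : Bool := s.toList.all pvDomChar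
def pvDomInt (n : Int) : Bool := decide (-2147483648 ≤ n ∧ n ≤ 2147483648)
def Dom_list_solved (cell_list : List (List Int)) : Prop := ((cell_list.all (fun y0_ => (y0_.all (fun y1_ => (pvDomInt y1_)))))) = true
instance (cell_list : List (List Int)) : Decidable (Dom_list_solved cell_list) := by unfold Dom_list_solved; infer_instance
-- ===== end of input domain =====

-- B replaces A's two whole-list passes by one short-circuiting traversal with an incremental seen-set (objective: simpler).

-- ===== PORT A =====
def list_solved (cell_list : List (List Int)) : Bool :=
  let num_solved : Int :=
    cell_list.foldl (fun acc cell => if cell.length == 1 then acc + 1 else acc) 0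
  if num_solved < (cell_list.length : Int) then false
  else
    let cell_set : PySem.Set Int :=
      PySem.Set.ofList (cell_list.map (fun cell => (PySem.List.pyGet? cell 0).getD 0))
    if (cell_set.length : Int) < (cell_list.length : Int) then false
    else true

-- ===== PORT B =====
def list_solved_go (seen : PySem.Set Int) : List (List Int) → Bool
  | [] => true
  | cell :: rest =>
    if cell.length ≠ 1 then false
    else
      let v : Int := (PySem.List.pyGet? cell 0).getD 0
      if PySem.Set.contains seen v then false
      else list_solved_go (PySem.Set.add seen v) rest

def list_solved_alt (cell_list : List (List Int)) : Bool :=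
  list_solved_go PySem.Set.empty cell_list

-- ===== PRECONDITION & SPEC =====
def Spec_list_solved (cell_list : List (List Int)) (out : Bool) : Prop := out = list_solved_alt cell_list
instance (cell_list : List (List Int)) (out : Bool) : Decidable (Spec_list_solved cell_list out) := by unfold Spec_list_solved; infer_instance

-- ===== CLAIM (what is proved, stated in full; the proofs are below) =====
def Claim_equal_list_solved : Prop := ∀ (cell_list : List (List Int)), Dom_list_solved cell_list → Spec_list_solved cell_list (list_solved cell_list)

-- ===== LEMMAS AND PROOFS =====

-- head projection used by both characterizations
def pvHead (cell : List Int) : Int := (PySem.List.pyGet? cell 0).getD 0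

-- set(xs) has as many elements as xs exactly when xs has no duplicates
theorem pv_ofList_length_eq_iff (xs : List Int) :
    (PySem.Set.ofList xs).length = xs.length ↔ xs.Nodup := by
  induction xs using List.reverseRecOn with
  | nil => simp
  | append_singleton xs x ih =>
    rw [PySem.Set.ofList_append_singleton, PySem.Set.add_eq_ite]
    by_cases hx : x ∈ PySem.Set.ofList xs
    · have hxm : x ∈ xs := (PySem.Set.mem_ofList _ _).1 hx
      have hle := PySem.Set.length_ofList_le (xs := xs)
      simp only [if_pos hx, List.length_append, List.length_singleton]
      constructor
      · intro h; omega
      · intro h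
        rw [List.nodup_append] at h
        exact (h.2.2 x hxm x (by simp) rfl).elim
    · have hxm : x ∉ xs := fun h => hx ((PySem.Set.mem_ofList _ _).2 h)
      simp only [if_neg hx, List.length_append, List.length_singleton]
      constructor
      · intro h
        have hlen : (PySem.Set.ofList xs).length = xs.length := by omega
        rw [List.nodup_append]
        refine ⟨ih.1 hlen, List.nodup_singleton x, fun a ha b hb => ?_⟩
        simp only [List.mem_singleton] at hb
        subst hb
        exact fun heq => hxm (heq ▸ ha)
      · intro h
        have := ih.2 (List.nodup_append.1 h).1
        omega

-- characterization of A
theorem pv_A_iff (cl : List (List Int)) :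
    list_solved cl = true ↔ (∀ c ∈ cl, c.length = 1) ∧ (cl.map pvHead).Nodup := by
  simp only [list_solved, PySem.List.foldl_if_add_one, zero_add]
  have hcount : cl.countP (fun c => c.length == 1) ≤ cl.length :=
    List.countP_le_length
  have hsetle := PySem.Set.length_ofList_le (xs := cl.map pvHead)
  simp only [List.length_map] at hsetle
  have hmap : cl.map (fun cell => (PySem.List.pyGet? cell 0).getD 0) = cl.map pvHead := rfl
  rw [hmap]
  split_ifs with h1 h2
  · simp only [false_iff]
    intro ⟨hall, _⟩
    have : cl.countP (fun c => c.length == 1) = cl.length :=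
      List.countP_eq_length.2 (by intro c hc; simp [hall c hc])
    omega
  · simp only [false_iff]
    intro ⟨_, hnd⟩
    have := (pv_ofList_length_eq_iff (cl.map pvHead)).2 hnd
    simp only [List.length_map] at this
    omega
  · simp only [true_iff]
    have hcnt : cl.countP (fun c => c.length == 1) = cl.length := by omega
    refine ⟨fun c hc => by simpa using List.countP_eq_length.1 hcnt c hc, ?_⟩
    apply (pv_ofList_length_eq_iff (cl.map pvHead)).1
    simp only [List.length_map]
    omega

-- characterization of B's loop, generalized over the seen-set
theorem pv_go_iff (cl : List (List Int)) : ∀ (seen : PySem.Set Int),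
    list_solved_go seen cl = true ↔
      (∀ c ∈ cl, c.length = 1) ∧ (cl.map pvHead).Nodup ∧
        ∀ v ∈ cl.map pvHead, v ∉ seen := by
  induction cl with
  | nil => intro seen; simp [list_solved_go]
  | cons c rest ih =>
    intro seen
    simp only [list_solved_go]
    split_ifs with hlen hmem
    · simp only [false_iff]
      intro ⟨hall, _⟩
      exact hlen (hall c (by simp))
    · simp only [false_iff]
      intro ⟨_, _, hnm⟩
      exact hnm (pvHead c) (by simp [pvHead]) ((PySem.Set.contains_iff _ _).1 hmem)
    · have hc1 : c.length = 1 := by omega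
      rw [ih]
      have hnotin : pvHead c ∉ seen := fun h => hmem ((PySem.Set.contains_iff _ _).2 h)
      constructor
      · intro ⟨hall, hnd, hns⟩
        refine ⟨fun x hx => ?_, ?_, ?_⟩
        · rcases List.mem_cons.1 hx with hx' | hx'
          · exact hx' ▸ hc1
          · exact hall x hx'
        · simp only [List.map_cons, List.nodup_cons]
          exact ⟨fun h => (hns _ h) ((PySem.Set.mem_add _ _ _).2 (Or.inr rfl)), hnd⟩
        · simp only [List.map_cons, List.mem_cons]
          rintro v (rfl | hv)
          · exact hnotin
          · exact fun h => (hns v hv) ((PySem.Set.mem_add _ _ _).2 (Or.inl h))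
      · intro ⟨hall, hnd, hns⟩
        simp only [List.map_cons, List.nodup_cons] at hnd
        simp only [List.map_cons, List.mem_cons] at hns
        refine ⟨fun x hx => hall x (by simp [hx]), hnd.2, fun v hv hvm => ?_⟩
        rcases (PySem.Set.mem_add _ _ _).1 hvm with h | rfl
        · exact hns v (Or.inr hv) h
        · exact hnd.1 hv

-- ===== VERDICT (by name: the statement is the Claim_ definition above) =====
theorem list_solved_spec : Claim_equal_list_solved := by
  intro cl _
  unfold Spec_list_solved list_solved_alt
  have hA := pv_A_iff cl
  have hB := pv_go_iff cl PySem.Set.empty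
  simp only [PySem.Set.empty, List.not_mem_nil, not_false_iff, imp_true_iff, and_true] at hB
  rcases Bool.eq_false_or_eq_true (list_solved cl) with h | h <;>
    rcases Bool.eq_false_or_eq_true (list_solved_go PySem.Set.empty cl) with h' | h' <;>
    simp_all
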